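-- pv_equiv track=rewrite | github.com/ZoeHancox/tgcnn_activation_graphs | src/utils.py | generate_pos_sequence
-- ===== SOURCE A (Python) =====
-- def generate_pos_sequence(x):
--     """Generate a list of lists to get y coordinate positions for the nodes
--      based on the number of events recorded per visit.
--
--     Args:
--         x (int): maximum number of nodes in any one visit
--
--     Returns:
--         List: List of lists of y coordinates index mapping to the max nodes for
--                each visit.
--     """
--     sequence = []
--     for i in range(x):
--         if i % 2 == 0:  # Even index, include zero
--             sequence.append(list(range(-i // 2, i // 2 + 1)))
--         else:  # Odd index, exclude zero
--             sublist = list(range(-(i // 2 + 1), i // 2 + 2))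
--             sublist.remove(0)
--             sequence.append(sublist)
--     return sequence
-- ===== SOURCE B (Python) =====
-- def generate_pos_sequence(x):
--     """Same result as A, built incrementally: each row extends the previous
--     row of the same parity by one smaller value in front and one larger at
--     the end, instead of recomputing a parity-based range and removing 0."""
--     sequence = []
--     prev_even = prev_odd = None
--     for i in range(x):
--         if i == 0:
--             row = [0]
--         elif i == 1:
--             row = [-1, 1]
--         elif i % 2 == 0:
--             row = [prev_even[0] - 1] + prev_even + [prev_even[-1] + 1]
--         else:
--             row = [prev_odd[0] - 1] + prev_odd + [prev_odd[-1] + 1]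
--         if i % 2 == 0:
--             prev_even = row
--         else:
--             prev_odd = row
--         sequence.append(row)
--     return sequence
-- ===== Notes on version B (the rewrite author's own statement) =====
-- stated objective: alternative
-- what changed: B derives each row incrementally from the previous row of the same parity (prepend its head minus one, append its last plus one), instead of recomputing a parity-based range and deleting 0 per row as A does.
import Mathlib
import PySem

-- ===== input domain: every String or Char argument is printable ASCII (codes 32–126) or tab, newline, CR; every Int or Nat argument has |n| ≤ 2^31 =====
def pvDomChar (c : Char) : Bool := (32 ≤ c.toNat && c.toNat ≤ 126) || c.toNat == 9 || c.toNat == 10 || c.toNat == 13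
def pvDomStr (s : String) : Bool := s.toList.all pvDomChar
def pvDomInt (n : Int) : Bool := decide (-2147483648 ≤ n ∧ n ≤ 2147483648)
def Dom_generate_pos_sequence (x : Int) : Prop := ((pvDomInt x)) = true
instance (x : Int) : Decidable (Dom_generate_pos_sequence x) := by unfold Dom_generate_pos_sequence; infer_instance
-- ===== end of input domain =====

-- B builds each row incrementally from the previous row of the same parity
-- (prepend one smaller value, append one larger) instead of recomputing a
-- parity-based range and removing 0 per row; objective: alternative.

-- ===== PORT A =====
-- body of A's loop for one index i
def pvARow (i : Int) : List Int :=
  if PySem.Int.mod i 2 = 0 then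
    PySem.List.pyRange (PySem.Int.floordiv (-i) 2) (PySem.Int.floordiv i 2 + 1) 1
  else
    -- sublist = list(range(-(i//2+1), i//2+2)); sublist.remove(0): 0 is always
    -- in this range for the i ≥ 0 the loop produces, so 'none' is unreachable
    match PySem.List.remove? (PySem.List.pyRange (-(PySem.Int.floordiv i 2 + 1))
        (PySem.Int.floordiv i 2 + 2) 1) 0 with
    | some l => l
    | none => []

def generate_pos_sequence (x : Int) : List (List Int) :=
  (PySem.List.pyRange 0 x 1).foldl (fun sequence i => sequence ++ [pvARow i]) []

-- ===== PORT B =====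
-- state: (sequence so far, prev_even, prev_odd); prev_* start as [] (Python: None,
-- read only after being set, so prev[0]/prev[-1] are ported with headD/getLastD on
-- an invariantly nonempty list)
def pvBRow (st : List (List Int) × List Int × List Int) (i : Int) : List Int :=
  if i = 0 then [(0 : Int)]
  else if i = 1 then [(-1 : Int), 1]
  else if PySem.Int.mod i 2 = 0 then
    (st.2.1.headD 0 - 1) :: st.2.1 ++ [st.2.1.getLastD 0 + 1]
  else
    (st.2.2.headD 0 - 1) :: st.2.2 ++ [st.2.2.getLastD 0 + 1]

def pvBStep (st : List (List Int) × List Int × List Int) (i : Int) :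
    List (List Int) × List Int × List Int :=
  if PySem.Int.mod i 2 = 0 then (st.1 ++ [pvBRow st i], pvBRow st i, st.2.2)
  else (st.1 ++ [pvBRow st i], st.2.1, pvBRow st i)

def generate_pos_sequence_alt (x : Int) : List (List Int) :=
  ((PySem.List.pyRange 0 x 1).foldl pvBStep ([], [], [])).1

-- ===== PRECONDITION & SPEC =====
def Spec_generate_pos_sequence (x : Int) (out : List (List Int)) : Prop := out = generate_pos_sequence_alt x
instance (x : Int) (out : List (List Int)) : Decidable (Spec_generate_pos_sequence x out) := by unfold Spec_generate_pos_sequence; infer_instance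

-- ===== CLAIM (what is proved, stated in full; the proofs are below) =====
def Claim_equal_generate_pos_sequence : Prop := ∀ (x : Int), Dom_generate_pos_sequence x → Spec_generate_pos_sequence x (generate_pos_sequence x)

-- ===== LEMMAS AND PROOFS =====

-- closed form of row n
def pvG (n : Nat) : List Int :=
  if n % 2 = 0 then
    PySem.List.pyRange (-((n / 2 : Nat) : Int)) (((n / 2 : Nat) : Int) + 1) 1
  else
    PySem.List.pyRange (-((n / 2 : Nat) : Int) - 1) 0 1 ++
      PySem.List.pyRange 1 (((n / 2 : Nat) : Int) + 2) 1

-- prev_even / prev_odd after processing the first n indices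
def pvE : Nat → List Int
  | 0 => []
  | n + 1 => if n % 2 = 0 then pvG n else pvE n

def pvO : Nat → List Int
  | 0 => []
  | n + 1 => if n % 2 = 1 then pvG n else pvO n

theorem pvE_char (n : Nat) : pvE (n + 1) = pvG (2 * (n / 2)) := by
  induction n with
  | zero => simp [pvE]
  | succ k ih =>
    rw [pvE]
    by_cases h : (k + 1) % 2 = 0
    · rw [if_pos h]; congr 1; omega
    · rw [if_neg h, ih]; congr 1; omega

theorem pvO_char (n : Nat) : pvO (n + 2) = pvG (2 * (n / 2) + 1) := by
  induction n with
  | zero => simp [pvO]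
  | succ k ih =>
    rw [pvO]
    by_cases h : (k + 2) % 2 = 1
    · rw [if_pos h]; congr 1; omega
    · rw [if_neg h, ih]; congr 1; omega

theorem pv_remove_zero (a b : Int) (ha : a ≤ 0) (hb : 0 < b) :
    PySem.List.remove? (PySem.List.pyRange a b 1) 0 =
      some (PySem.List.pyRange a 0 1 ++ PySem.List.pyRange 1 b 1) := by
  rw [PySem.List.pyRange_one_append a 0 b ha (le_of_lt hb),
      PySem.List.pyRange_one_cons hb]
  have hnm : (0 : Int) ∉ PySem.List.pyRange a 0 1 := by
    intro h
    have := (PySem.List.mem_pyRange_one).mp h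
    omega
  have h01 : (0 : Int) + 1 = 1 := by ring
  rw [h01]
  generalize PySem.List.pyRange a 0 1 = l1 at hnm ⊢
  induction l1 with
  | nil => simp
  | cons c t ih =>
    have hc : c ≠ 0 := by intro h; exact hnm (by simp [h])
    rw [List.cons_append, PySem.List.remove?_cons_of_ne _ hc,
        ih (by intro h; exact hnm (List.mem_cons_of_mem _ h))]
    simp

theorem pvARow_eq (n : Nat) : pvARow (n : Int) = pvG n := by
  unfold pvARow pvG
  have hfd : PySem.Int.floordiv (n : Int) 2 = ((n / 2 : Nat) : Int) := by
    rw [PySem.Int.floordiv_eq_ediv_of_pos (by norm_num)]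
    exact_mod_cast (Int.natCast_div n 2).symm
  have hmod : PySem.Int.mod (n : Int) 2 = ((n % 2 : Nat) : Int) := by
    rw [PySem.Int.mod_eq_emod_of_pos (by norm_num)]
    exact_mod_cast (Int.natCast_emod n 2).symm
  by_cases h0 : n % 2 = 0
  · rw [if_pos (by rw [hmod, h0]; rfl), if_pos h0]
    have hneg : PySem.Int.floordiv (-(n : Int)) 2 = -((n / 2 : Nat) : Int) := by
      rw [PySem.Int.floordiv_eq_ediv_of_pos (by norm_num)]
      obtain ⟨m, hm⟩ : ∃ m, n = 2 * m := ⟨n / 2, by omega⟩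
      have h2 : -(n : Int) = 2 * (-(m : Int)) := by push_cast [hm]; ring
      rw [h2, Int.mul_ediv_cancel_left _ (by norm_num)]
      have : n / 2 = m := by omega
      rw [this]
    rw [hneg, hfd]
  · rw [if_neg (by rw [hmod]; omega), if_neg h0, hfd,
        pv_remove_zero _ _ (by omega) (by omega)]
    have : -(((n / 2 : Nat) : Int) + 1) = -((n / 2 : Nat) : Int) - 1 := by ring
    rw [this]

theorem pv_headD_pyRange (a b : Int) (h : a < b) :
    (PySem.List.pyRange a b 1).headD 0 = a := by
  rw [PySem.List.pyRange_one_cons h]; rfl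

-- structural recurrences of the closed form
theorem pvG_even_step (m : Nat) (hm : 1 ≤ m) :
    pvG (2 * m) =
      ((pvG (2 * (m - 1))).headD 0 - 1) :: pvG (2 * (m - 1)) ++
        [(pvG (2 * (m - 1))).getLastD 0 + 1] := by
  obtain ⟨k, rfl⟩ : ∃ k, m = k + 1 := ⟨m - 1, by omega⟩
  unfold pvG
  rw [if_pos (by omega), if_pos (by omega)]
  have h1 : 2 * (k + 1) / 2 = k + 1 := by omega
  have h2 : 2 * (k + 1 - 1) / 2 = k := by omega
  rw [h1, h2]
  push_cast
  rw [show -((k : Int) + 1) = (-(k : Int) - 1) by ring,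
      PySem.List.pyRange_one_cons (show (-(k : Int) - 1) < (k : Int) + 1 + 1 by omega),
      show (-(k : Int) - 1) + 1 = -(k : Int) by ring,
      show ((k : Int) + 1 + 1) = ((k : Int) + 1) + 1 by ring,
      PySem.List.pyRange_one_succ_right (show (-(k : Int)) ≤ (k : Int) + 1 by omega),
      pv_headD_pyRange _ _ (show (-(k : Int)) < (k : Int) + 1 by omega),
      show ((k : Int) + 1) = (k : Int) + 1 from rfl,
      PySem.List.pyRange_one_succ_right (show (-(k : Int)) ≤ (k : Int) by omega)]
  simp [List.cons_append, List.append_assoc]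

theorem pvG_odd_step (m : Nat) (hm : 1 ≤ m) :
    pvG (2 * m + 1) =
      ((pvG (2 * m - 1)).headD 0 - 1) :: pvG (2 * m - 1) ++
        [(pvG (2 * m - 1)).getLastD 0 + 1] := by
  obtain ⟨k, rfl⟩ : ∃ k, m = k + 1 := ⟨m - 1, by omega⟩
  rw [show 2 * (k + 1) - 1 = 2 * k + 1 by omega]
  unfold pvG
  rw [if_neg (by omega), if_neg (by omega)]
  rw [show (2 * (k + 1) + 1) / 2 = k + 1 by omega, show (2 * k + 1) / 2 = k by omega]
  push_cast
  rw [show (-((k : Int) + 1) - 1) = (-(k : Int) - 1) - 1 by ring,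
      PySem.List.pyRange_one_cons (show (-(k : Int) - 1) - 1 < 0 by omega),
      show ((-(k : Int) - 1) - 1) + 1 = -(k : Int) - 1 by ring,
      show ((k : Int) + 1 + 2) = ((k : Int) + 2) + 1 by ring,
      PySem.List.pyRange_one_succ_right (show (1 : Int) ≤ (k : Int) + 2 by omega)]
  have hhd : ((PySem.List.pyRange (-(k : Int) - 1) 0 1 ++
      PySem.List.pyRange 1 ((k : Int) + 2) 1)).headD 0 = -(k : Int) - 1 := by
    rw [PySem.List.pyRange_one_cons (show (-(k : Int) - 1) < 0 by omega)]
    rfl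
  have hlast : ((PySem.List.pyRange (-(k : Int) - 1) 0 1 ++
      PySem.List.pyRange 1 ((k : Int) + 2) 1)).getLastD 0 = (k : Int) + 1 := by
    rw [show ((k : Int) + 2) = ((k : Int) + 1) + 1 by ring,
        PySem.List.pyRange_one_succ_right (show (1 : Int) ≤ (k : Int) + 1 by omega),
        ← List.append_assoc]
    simp
  rw [hhd, hlast, show ((k : Int) + 1) + 1 = (k : Int) + 2 by ring]
  simp [List.cons_append, List.append_assoc]

-- the loop invariant of B
theorem pvB_invariant (n : Nat) :
    (PySem.List.pyRange 0 (n : Int) 1).foldl pvBStep ([], [], []) =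
      ((List.range n).map pvG, pvE n, pvO n) := by
  induction n with
  | zero => simp [pvE, pvO]
  | succ k ih =>
    rw [show ((k + 1 : Nat) : Int) = ((k : Nat) : Int) + 1 by push_cast; ring,
        PySem.List.pyRange_one_succ_right (by omega), List.foldl_append, ih,
        List.foldl_cons, List.foldl_nil, List.range_succ, List.map_append]
    rcases Nat.lt_or_ge k 2 with hk | hk
    · interval_cases k <;> decide
    · have hmod : PySem.Int.mod (k : Int) 2 = ((k % 2 : Nat) : Int) := by
        rw [PySem.Int.mod_eq_emod_of_pos (by norm_num)]
        exact_mod_cast (Int.natCast_emod k 2).symm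
      have h0 : ((k : Int)) ≠ 0 := by omega
      have h1 : ((k : Int)) ≠ 1 := by omega
      by_cases he : k % 2 = 0
      · obtain ⟨m, rfl⟩ : ∃ m, k = 2 * m := ⟨k / 2, by omega⟩
        have hm1 : 1 ≤ m := by omega
        have hEk : pvE (2 * m) = pvG (2 * (m - 1)) := by
          rw [show 2 * m = (2 * m - 1) + 1 by omega, pvE_char]
          congr 1; omega
        have hrow : pvBRow (List.map pvG (List.range (2 * m)), pvE (2 * m), pvO (2 * m))
            ((2 * m : Nat) : Int) = pvG (2 * m) := by
          unfold pvBRow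
          rw [if_neg h0, if_neg h1, if_pos (by rw [hmod, he]; rfl)]
          simpa [hEk] using (pvG_even_step m hm1).symm
        unfold pvBStep
        rw [if_pos (by rw [hmod, he]; rfl), hrow]
        have hE' : pvE (2 * m + 1) = pvG (2 * m) := by rw [pvE, if_pos he]
        have hO' : pvO (2 * m + 1) = pvO (2 * m) := by rw [pvO, if_neg (by omega)]
        rw [hE', hO']
        rfl
      · obtain ⟨m, rfl⟩ : ∃ m, k = 2 * m + 1 := ⟨k / 2, by omega⟩
        have hm1 : 1 ≤ m := by omega
        have ho : (2 * m + 1) % 2 = 1 := by omega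
        have hOk : pvO (2 * m + 1) = pvG (2 * m - 1) := by
          rw [show 2 * m + 1 = (2 * m - 1) + 2 by omega, pvO_char]
          congr 1; omega
        have hrow : pvBRow (List.map pvG (List.range (2 * m + 1)), pvE (2 * m + 1), pvO (2 * m + 1))
            ((2 * m + 1 : Nat) : Int) = pvG (2 * m + 1) := by
          unfold pvBRow
          rw [if_neg h0, if_neg h1, if_neg (by rw [hmod, ho]; simp)]
          simpa [hOk] using (pvG_odd_step m hm1).symm
        unfold pvBStep
        rw [if_neg (by rw [hmod, ho]; simp), hrow]
        have hE' : pvE (2 * m + 1 + 1) = pvE (2 * m + 1) := by rw [pvE, if_neg (by omega)]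
        have hO' : pvO (2 * m + 1 + 1) = pvG (2 * m + 1) := by rw [pvO, if_pos ho]
        rw [hE', hO']
        rfl

theorem pvA_eq (x : Int) :
    generate_pos_sequence x = (List.range x.toNat).map pvG := by
  unfold generate_pos_sequence
  rw [PySem.List.foldl_append_singleton_eq_map]
  by_cases hx : 0 ≤ x
  · rw [show x = ((x.toNat : Nat) : Int) by omega, PySem.List.pyRange_zero_nat,
        List.map_map, Int.toNat_natCast, List.nil_append]
    exact List.map_congr_left (fun k _ => pvARow_eq k)
  · rw [PySem.List.pyRange_one_eq_nil (by omega)]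
    simp [Int.toNat_of_nonpos (by omega : x ≤ 0)]

theorem pvB_eq (x : Int) :
    generate_pos_sequence_alt x = (List.range x.toNat).map pvG := by
  unfold generate_pos_sequence_alt
  by_cases hx : 0 ≤ x
  · rw [show x = ((x.toNat : Nat) : Int) by omega, Int.toNat_natCast, pvB_invariant]
  · rw [PySem.List.pyRange_one_eq_nil (by omega)]
    simp [Int.toNat_of_nonpos (by omega : x ≤ 0)]

-- ===== VERDICT (by name: the statement is the Claim_ definition above) =====
theorem generate_pos_sequence_spec : Claim_equal_generate_pos_sequence := by
  intro x _
  unfold Spec_generate_pos_sequence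
  rw [pvA_eq, pvB_eq]
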